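-- pv_equiv track=rewrite | github.com/TurnerAtwood/rcube | RCube/dispatch.py | isCubeColorCountValid
-- ===== SOURCE A (Python) =====
-- def isCubeColorCountValid(cube):
--     foundColors = {}
--     for pieceColor in cube:
--         if not pieceColor in foundColors:
--             foundColors[pieceColor] = 0
--         foundColors[pieceColor] += 1
--
--     if not len(foundColors) == 6:
--         return False
--
--     for color in foundColors:
--         if not foundColors[color] == 9:
--             return False
--
--     return True
-- ===== SOURCE B (Python) =====
-- def isCubeColorCountValid(cube):
--     # Peel one color per round: 6 rounds must each remove exactly 9 stickers.
--     rest = list(cube)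
--     for _ in range(6):
--         if not rest:
--             return False
--         color = rest[0]
--         remaining = [x for x in rest if x != color]
--         if len(rest) - len(remaining) != 9:
--             return False
--         rest = remaining
--     return not rest
-- ===== Notes on version B (the rewrite author's own statement) =====
-- stated objective: alternative
-- what changed: B replaces A's one-pass frequency dict (then 6-keys/9-each check) with a peel algorithm: 6 successive partition rounds, each removing all stickers of the first remaining color and demanding exactly 9 removed, succeeding iff nothing is left.
import Mathlib
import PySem

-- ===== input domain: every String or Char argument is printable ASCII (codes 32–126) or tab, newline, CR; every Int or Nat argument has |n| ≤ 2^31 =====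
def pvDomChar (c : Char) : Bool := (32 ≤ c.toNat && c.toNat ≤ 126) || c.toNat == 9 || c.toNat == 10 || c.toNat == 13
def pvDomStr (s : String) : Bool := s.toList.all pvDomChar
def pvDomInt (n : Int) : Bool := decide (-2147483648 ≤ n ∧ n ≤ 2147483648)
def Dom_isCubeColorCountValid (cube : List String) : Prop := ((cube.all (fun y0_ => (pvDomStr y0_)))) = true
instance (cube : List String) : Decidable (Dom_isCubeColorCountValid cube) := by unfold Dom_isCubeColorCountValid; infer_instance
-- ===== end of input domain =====

-- B: peel algorithm — 6 partition rounds, each removing all stickers of the first remaining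
-- color and demanding exactly 9 removed — instead of A's frequency dict (alternative; same cost class).

-- ===== PORT A =====
def isCubeColorCountValid (cube : List String) : Bool :=
  let foundColors := cube.foldl
    (fun d pieceColor =>
      (if d.contains pieceColor then d else d.insert pieceColor 0).modify pieceColor 0
        (fun v => v + 1))
    (PySem.Dict.empty : PySem.Dict String Int)
  if !(PySem.Dict.size foundColors == 6) then false
  else foundColors.keys.all (fun color => foundColors.getD color 0 == 9)

-- ===== PORT B =====
-- the body of Source B's `for _ in range(6)` loop with its early returns, as fuel recursion
def pvPeelLoop : Nat → List String → Bool
  | 0, rest => rest.isEmpty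
  | n + 1, rest =>
    match rest with
    | [] => false
    | color :: _ =>
      let remaining := rest.filter (fun x => x != color)
      if ((rest.length : Int) - (remaining.length : Int)) != 9 then false
      else pvPeelLoop n remaining

def isCubeColorCountValid_alt (cube : List String) : Bool :=
  pvPeelLoop 6 cube

-- ===== PRECONDITION & SPEC =====
def Spec_isCubeColorCountValid (cube : List String) (out : Bool) : Prop := out = isCubeColorCountValid_alt cube
instance (cube : List String) (out : Bool) : Decidable (Spec_isCubeColorCountValid cube out) := by unfold Spec_isCubeColorCountValid; infer_instance

-- ===== CLAIM (what is proved, stated in full; the proofs are below) =====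
def Claim_equal_isCubeColorCountValid : Prop := ∀ (cube : List String), Dom_isCubeColorCountValid cube → Spec_isCubeColorCountValid cube (isCubeColorCountValid cube)

-- ===== LEMMAS AND PROOFS =====

-- A's loop body (setdefault-to-0 then +1) is Counter's loop body.
theorem stepA_eq_counter_step (cube : List String) :
    cube.foldl
      (fun (d : PySem.Dict String Int) pieceColor =>
        (if d.contains pieceColor then d else d.insert pieceColor 0).modify pieceColor 0
          (fun v => v + 1))
      PySem.Dict.empty
    = cube.foldl (fun d x => d.modify x 0 (fun v => v + 1)) PySem.Dict.empty := by
  congr 1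
  funext d c
  by_cases h : d.contains c = true
  · simp [h]
  · have h' : d.contains c = false := by simpa using h
    simp [h', PySem.Dict.modify, PySem.Dict.getD_insert_self,
      PySem.Dict.insert_insert_self, PySem.Dict.getD_of_not_contains d 0 h']

-- number of distinct elements of l, as a Finset cardinality
theorem setOfList_length_eq_card (l : List String) :
    (PySem.Set.ofList l).length = l.toFinset.card := by
  have hnd : (PySem.Set.ofList l).Nodup := PySem.Set.nodup_ofList l
  have hmem : ∀ x, x ∈ PySem.Set.ofList l ↔ x ∈ l := fun x => PySem.Set.mem_ofList l x
  have : (PySem.Set.ofList l).toFinset = l.toFinset := by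
    ext x; simp [List.mem_toFinset, hmem]
  calc (PySem.Set.ofList l).length
      = (PySem.Set.ofList l).toFinset.card := (List.toFinset_card_of_nodup hnd).symm
    _ = l.toFinset.card := by rw [this]

-- the invariant of B's loop: it accepts iff there are exactly n distinct colors, each 9 times
theorem pvPeelLoop_iff (n : Nat) (l : List String) :
    pvPeelLoop n l = true ↔ (l.toFinset.card = n ∧ ∀ c ∈ l, l.count c = 9) := by
  induction n generalizing l with
  | zero =>
    simp only [pvPeelLoop, List.isEmpty_iff]
    constructor
    · rintro rfl; simp
    · rintro ⟨hc, -⟩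
      rcases l with _ | ⟨a, t⟩
      · rfl
      · exfalso
        have : a ∈ (a :: t).toFinset := by simp
        have := Finset.card_pos.mpr ⟨a, this⟩
        omega
  | succ n ih =>
    rcases l with _ | ⟨a, t⟩
    · simp [pvPeelLoop]
    · set l := a :: t with hl
      have hal : a ∈ l := by simp [hl]
      set rem := l.filter (fun x => x != a) with hrem
      have hremcard : rem.toFinset = l.toFinset.erase a := by
        ext x
        simp [hrem, Finset.mem_erase, bne_iff_ne, and_comm]
      have hlen : rem.length = l.length - l.count a := by
        have h1 : rem.length = l.countP (fun x => x != a) := by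
          rw [hrem]; exact List.countP_eq_length_filter.symm
        have h2 := l.length_eq_countP_add_countP (fun x => x == a)
        have h3 : l.count a = l.countP (fun x => x == a) := rfl
        have h4 : l.countP (fun x => x != a)
            = l.countP (fun x => decide ¬((x == a) = true)) := by
          apply List.countP_congr
          intro x _
          cases hx : (x == a) <;> simp_all
        omega
      have hcount_le : l.count a ≤ l.length := List.count_le_length
      show (if ((l.length : Int) - (rem.length : Int)) != 9 then false else pvPeelLoop n rem)
            = true ↔ _
      by_cases h9 : l.count a = 9
      · have hdiff : ((l.length : Int) - (rem.length : Int)) = 9 := by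
          rw [hlen]; omega
        rw [hdiff]
        simp only [bne_self_eq_false, Bool.false_eq_true, if_false, ih]
        have hainset : a ∈ l.toFinset := by simp [hal]
        have hcards : rem.toFinset.card = l.toFinset.card - 1 := by
          rw [hremcard, Finset.card_erase_of_mem hainset]
        have hcardpos : 1 ≤ l.toFinset.card := Finset.card_pos.mpr ⟨a, hainset⟩
        have hcnt : ∀ c, c ≠ a → rem.count c = l.count c := by
          intro c hca
          simp [hrem, List.count_filter, hca]
        constructor
        · rintro ⟨hc, hall⟩
          refine ⟨by omega, ?_⟩
          intro c hcl
          by_cases hca : c = a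
          · subst hca; exact h9
          · have hcrem : c ∈ rem := by
              simp [hrem, List.mem_filter, hcl, bne_iff_ne, hca]
            rw [← hcnt c hca]; exact hall c hcrem
        · rintro ⟨hc, hall⟩
          refine ⟨by omega, ?_⟩
          intro c hcrem
          have hca : c ≠ a := by
            have := (List.mem_filter.mp (hrem ▸ hcrem)).2
            simpa [bne_iff_ne] using this
          have hcl : c ∈ l := (List.mem_filter.mp (hrem ▸ hcrem)).1
          rw [hcnt c hca]; exact hall c hcl
      · have hdiff : ((l.length : Int) - (rem.length : Int)) ≠ 9 := by
          rw [hlen]; push_cast [Nat.cast_sub hcount_le]; omega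
        simp only [bne_iff_ne, if_pos hdiff]
        constructor
        · intro h; exact absurd h (by simp)
        · rintro ⟨-, hall⟩
          exact absurd (hall a hal) h9

-- ===== VERDICT (by name: the statement is the Claim_ definition above) =====
theorem isCubeColorCountValid_spec : Claim_equal_isCubeColorCountValid := by
  intro cube _
  unfold Spec_isCubeColorCountValid isCubeColorCountValid isCubeColorCountValid_alt
  rw [stepA_eq_counter_step, ← PySem.Dict.counter_eq_foldl]
  simp only [PySem.Dict.size, PySem.Dict.items_counter, PySem.Dict.keys_counter,
    PySem.Dict.getD_counter, List.length_map]
  cases h : pvPeelLoop 6 cube with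
  | false =>
    have hnot : ¬ (cube.toFinset.card = 6 ∧ ∀ c ∈ cube, cube.count c = 9) := by
      intro hc
      exact absurd ((pvPeelLoop_iff 6 cube).mpr hc) (by simp [h])
    by_cases h6 : (PySem.Set.ofList cube).length = 6
    · have hcard : cube.toFinset.card = 6 := by rw [← setOfList_length_eq_card]; exact h6
      have hnall : ¬ ∀ c ∈ cube, cube.count c = 9 := fun hall => hnot ⟨hcard, hall⟩
      obtain ⟨c, hcl, hc9⟩ := not_forall₂.mp hnall
      have hcS : c ∈ PySem.Set.ofList cube := (PySem.Set.mem_ofList cube c).mpr hcl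
      simp only [h6, beq_self_eq_true, Bool.not_true, Bool.false_eq_true, if_false]
      rw [List.all_eq_false]
      refine ⟨c, hcS, ?_⟩
      simp only [beq_iff_eq]
      exact_mod_cast hc9
    · simp [h6]
  | true =>
    obtain ⟨hcard, hall⟩ := (pvPeelLoop_iff 6 cube).mp h
    have h6 : (PySem.Set.ofList cube).length = 6 := by
      rw [setOfList_length_eq_card]; exact hcard
    simp only [h6, beq_self_eq_true, Bool.not_true, Bool.false_eq_true, if_false]
    rw [List.all_eq_true]
    intro c hcS
    have hcl : c ∈ cube := (PySem.Set.mem_ofList cube c).mp hcS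
    have := hall c hcl
    simp [this]
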